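-- pv_equiv track=rewrite | github.com/ElmerAdrianV/n-queens-sets | 8reinas.py | genera_diagonal_ocupado
-- ===== SOURCE A (Python) =====
-- def genera_diagonal_ocupado(pos,n):
--     x,y = pos//n, pos%n
--     numDiagID = abs(x-y)
--     numDiagDI = abs(y+x-(n-1))
--     # llenando la diagonal de izqueirda a derecha
--     startID = pos-(n+1)*x if x-y <= 0 else pos-(n+1)*(x-numDiagID)
--     diagonalID = {startID+i*(n+1) for i in range(n-numDiagID)}
--     # llenando la diagonal de izqueirda a derecha
--     startDI = pos-(n-1)*x if x+y <= n-1 else pos-(n-1)*(x-numDiagDI)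
--     diagonalDI = {startDI+i*(n-1) for i in range(n-numDiagDI)}
--     return diagonalID | diagonalDI
-- ===== SOURCE B (Python) =====
-- def genera_diagonal_ocupado(pos, n):
--     x, y = divmod(pos, n)
--     occupied = set()
--     for r in range(n):          # '\' diagonal: cells with row - col == x - y
--         c = r - (x - y)
--         if 0 <= c < n:
--             occupied.add(r * n + c)
--     for r in range(n):          # '/' diagonal: cells with row + col == x + y
--         c = (x + y) - r
--         if 0 <= c < n:
--             occupied.add(r * n + c)
--     return occupied
-- ===== Notes on version B (the rewrite author's own statement) =====
-- stated objective: simpler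
-- what changed: B replaces A's closed-form start-offset/diagonal-length arithmetic and ranged set comprehensions with a plain bounds-checked row scan: for each row it computes the column on each diagonal and keeps the cell if the column is in range.
import Mathlib
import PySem

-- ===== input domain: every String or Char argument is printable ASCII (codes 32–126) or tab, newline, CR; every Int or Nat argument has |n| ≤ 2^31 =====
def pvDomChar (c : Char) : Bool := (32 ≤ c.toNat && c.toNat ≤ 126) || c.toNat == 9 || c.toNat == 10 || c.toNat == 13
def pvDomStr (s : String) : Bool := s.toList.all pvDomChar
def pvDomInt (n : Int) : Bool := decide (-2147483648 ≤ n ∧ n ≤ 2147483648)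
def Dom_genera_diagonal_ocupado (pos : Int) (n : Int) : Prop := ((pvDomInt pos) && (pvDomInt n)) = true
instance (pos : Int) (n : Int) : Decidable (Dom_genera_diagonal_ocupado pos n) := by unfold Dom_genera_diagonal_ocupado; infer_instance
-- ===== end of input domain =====

-- B computes the two diagonals through pos by a bounds-checked row scan instead of A's
-- closed-form start-offset/length arithmetic; objective: simpler, same O(n) cost.


-- ===== PORT A =====
def genera_diagonal_ocupado (pos : Int) (n : Int) : List Int :=
  let x := PySem.Int.floordiv pos n
  let y := PySem.Int.mod pos n
  let numDiagID := |x - y|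
  let numDiagDI := |y + x - (n - 1)|
  let startID := if x - y ≤ 0 then pos - (n + 1) * x else pos - (n + 1) * (x - numDiagID)
  let diagonalID := PySem.Set.ofList
    ((PySem.List.pyRange 0 (n - numDiagID) 1).map (fun i => startID + i * (n + 1)))
  let startDI := if x + y ≤ n - 1 then pos - (n - 1) * x else pos - (n - 1) * (x - numDiagDI)
  let diagonalDI := PySem.Set.ofList
    ((PySem.List.pyRange 0 (n - numDiagDI) 1).map (fun i => startDI + i * (n - 1)))
  PySem.Set.union diagonalID diagonalDI

-- ===== PORT B =====
def genera_diagonal_ocupado_alt (pos : Int) (n : Int) : List Int :=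
  let x := PySem.Int.floordiv pos n
  let y := PySem.Int.mod pos n
  let occ1 := (PySem.List.pyRange 0 n 1).foldl (fun occ r =>
      let c := r - (x - y)
      if 0 ≤ c ∧ c < n then PySem.Set.add occ (r * n + c) else occ) PySem.Set.empty
  (PySem.List.pyRange 0 n 1).foldl (fun occ r =>
      let c := (x + y) - r
      if 0 ≤ c ∧ c < n then PySem.Set.add occ (r * n + c) else occ) occ1

-- ===== PRECONDITION & SPEC =====
-- Pre_ excludes exactly n = 0, where Python's pos // n raises ZeroDivisionError.
def Pre_genera_diagonal_ocupado (pos : Int) (n : Int) : Prop := n ≠ 0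
instance (pos : Int) (n : Int) : Decidable (Pre_genera_diagonal_ocupado pos n) := by unfold Pre_genera_diagonal_ocupado; infer_instance
def pvWitness_genera_diagonal_ocupado : Int × Int := (2, 3)

def Spec_genera_diagonal_ocupado (pos : Int) (n : Int) (out : List Int) : Prop := out = genera_diagonal_ocupado_alt pos n
instance (pos : Int) (n : Int) (out : List Int) : Decidable (Spec_genera_diagonal_ocupado pos n out) := by unfold Spec_genera_diagonal_ocupado; infer_instance

-- ===== CLAIM (what is proved, stated in full; the proofs are below) =====
def Claim_equal_genera_diagonal_ocupado : Prop := ∀ (pos : Int) (n : Int), Dom_genera_diagonal_ocupado pos n → Pre_genera_diagonal_ocupado pos n → Spec_genera_diagonal_ocupado pos n (genera_diagonal_ocupado pos n)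

-- ===== LEMMAS AND PROOFS =====

-- a guarded-add loop over a list is Set.update with the filtered, mapped list
theorem pv_fold_guard (p : Int → Prop) [DecidablePred p] (f : Int → Int) :
    ∀ (l : List Int) (s : PySem.Set Int),
      l.foldl (fun occ r => if p r then PySem.Set.add occ (f r) else occ) s
        = PySem.Set.update s (l.filterMap (fun r => if p r then some (f r) else none)) := by
  intro l
  induction l with
  | nil => intro s; rfl
  | cons a l ih =>
      intro s
      by_cases h : p a <;> simp [List.foldl_cons, h, ih, PySem.Set.update]

-- filtering an initial segment of ℤ to an interval and mapping is a map over the clipped interval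
theorem pv_filterMap_range_interval (g : Int → Int) (a b : Int) :
    ∀ (N : Nat),
      ((List.range N).map (fun (k : Nat) => (k : Int))).filterMap
          (fun r => if a ≤ r ∧ r < b then some (g r) else none)
        = (List.range (min b (N : Int) - max a 0).toNat).map (fun (k : Nat) => g (max a 0 + (k : Int))) := by
  intro N
  induction N with
  | zero =>
      have h0 : (min b ((0 : Nat) : Int) - max a 0).toNat = 0 := by omega
      simp only [h0, List.range_zero, List.map_nil, List.filterMap_nil]
  | succ N ih =>
      rw [List.range_succ, List.map_append, List.filterMap_append, ih]
      by_cases h : a ≤ (N : Int) ∧ (N : Int) < b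
      · have hC : (min b ((N + 1 : Nat) : Int) - max a 0).toNat
            = (min b ((N : Nat) : Int) - max a 0).toNat + 1 := by push_cast; omega
        have hN : max a 0 + ((min b ((N : Nat) : Int) - max a 0).toNat : Int) = (N : Int) := by omega
        rw [hC, List.range_succ, List.map_append]
        simp only [h, and_self, if_true, List.filterMap_cons, List.filterMap_nil,
          List.map_cons, List.map_nil, List.append_cancel_left_eq]
        rw [hN]
      · have hC : (min b ((N + 1 : Nat) : Int) - max a 0).toNat
            = (min b ((N : Nat) : Int) - max a 0).toNat := by push_cast; omega
        simp [h]
        congr 2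
        omega

-- an affine image of range is nodup when the step is nonzero or the list is short
theorem pv_nodup_affine (a step : Int) (M : Nat) (h : step ≠ 0 ∨ M ≤ 1) :
    ((List.range M).map (fun (k : Nat) => a + (k : Int) * step)).Nodup := by
  rcases h with h | h
  · refine (List.nodup_range).map ?_
    intro i j hij
    simp only at hij
    have h1 : (i : Int) * step = (j : Int) * step := by linarith
    have h2 : (i : Int) = (j : Int) := mul_right_cancel₀ h h1
    omega
  · interval_cases M <;> simp

-- ===== VERDICT (by name: the statement is the Claim_ definition above) =====
theorem genera_diagonal_ocupado_spec : Claim_equal_genera_diagonal_ocupado := by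
  intro pos n _ hn
  unfold Spec_genera_diagonal_ocupado
  unfold Pre_genera_diagonal_ocupado at hn
  rcases lt_or_gt_of_ne hn with hneg | hposn
  · -- n < 0 : both sides are the empty set
    unfold genera_diagonal_ocupado genera_diagonal_ocupado_alt
    simp only [PySem.List.pyRange_one, Int.sub_zero]
    have h1 : (n - |PySem.Int.floordiv pos n - PySem.Int.mod pos n|).toNat = 0 := by
      have := abs_nonneg (PySem.Int.floordiv pos n - PySem.Int.mod pos n); omega
    have h2 : (n - |PySem.Int.mod pos n + PySem.Int.floordiv pos n - (n - 1)|).toNat = 0 := by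
      have := abs_nonneg (PySem.Int.mod pos n + PySem.Int.floordiv pos n - (n - 1)); omega
    have h3 : n.toNat = 0 := by omega
    rw [h1, h2, h3]
    simp [PySem.Set.ofList, PySem.Set.union, PySem.Set.empty]
  · -- n ≥ 1
    unfold genera_diagonal_ocupado genera_diagonal_ocupado_alt
    simp only [PySem.List.pyRange_one, Int.sub_zero, zero_add]
    set x := PySem.Int.floordiv pos n with hx
    set y := PySem.Int.mod pos n with hy
    have hn1 : (1 : Int) ≤ n := hposn
    have hy0 : 0 ≤ y := PySem.Int.mod_nonneg pos hposn
    have hy1 : y < n := PySem.Int.mod_lt pos hposn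
    have hpn : pos = x * n + y := (PySem.Int.floordiv_mul_add_mod pos n).symm
    -- B side: turn the two guarded folds into updates with filtered lists
    rw [pv_fold_guard (fun r => 0 ≤ r - (x - y) ∧ r - (x - y) < n)
          (fun r => r * n + (r - (x - y))),
        pv_fold_guard (fun r => 0 ≤ x + y - r ∧ x + y - r < n)
          (fun r => r * n + (x + y - r))]
    have hg1 : (fun r : Int => if 0 ≤ r - (x - y) ∧ r - (x - y) < n
                  then some (r * n + (r - (x - y))) else none)
        = (fun r : Int => if x - y ≤ r ∧ r < n + (x - y)
                  then some (r * (n + 1) - (x - y)) else none) := by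
      funext r
      by_cases h : x - y ≤ r ∧ r < n + (x - y)
      · rw [if_pos (by omega), if_pos h]; congr 1; ring
      · rw [if_neg (by omega), if_neg h]
    have hg2 : (fun r : Int => if 0 ≤ x + y - r ∧ x + y - r < n
                  then some (r * n + (x + y - r)) else none)
        = (fun r : Int => if x + y - n + 1 ≤ r ∧ r < x + y + 1
                  then some (r * (n - 1) + (x + y)) else none) := by
      funext r
      by_cases h : x + y - n + 1 ≤ r ∧ r < x + y + 1
      · rw [if_pos (by omega), if_pos h]; congr 1; ring
      · rw [if_neg (by omega), if_neg h]
    rw [hg1, hg2,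
        pv_filterMap_range_interval (fun r => r * (n + 1) - (x - y)) (x - y) (n + (x - y)) n.toNat,
        pv_filterMap_range_interval (fun r => r * (n - 1) + (x + y)) (x + y - n + 1) (x + y + 1) n.toNat]
    simp only [List.map_map, Function.comp_def]
    have hnd2 : ((List.range (n - |y + x - (n - 1)|).toNat).map
        (fun (k : Nat) => (if x + y ≤ n - 1 then pos - (n - 1) * x
            else pos - (n - 1) * (x - |y + x - (n - 1)|)) + (k : Int) * (n - 1))).Nodup := by
      apply pv_nodup_affine
      rcases eq_or_lt_of_le hn1 with h1 | h2
      · right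
        have := abs_nonneg (y + x - (n - 1)); omega
      · left; omega
    rw [PySem.Set.ofList_eq_self_of_nodup _ hnd2]
    have e1 : (List.range (n - |x - y|).toNat).map
          (fun (k : Nat) => (if x - y ≤ 0 then pos - (n + 1) * x
              else pos - (n + 1) * (x - |x - y|)) + (k : Int) * (n + 1))
        = (List.range (min (n + (x - y)) ((n.toNat : Int)) - max (x - y) 0).toNat).map
          (fun (k : Nat) => (max (x - y) 0 + (k : Int)) * (n + 1) - (x - y)) := by
      rcases le_or_gt (x - y) 0 with hle | hlt
      · rw [if_pos hle, abs_of_nonpos hle, max_eq_right hle,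
            show (n - -(x - y)).toNat = (min (n + (x - y)) ((n.toNat : Int)) - 0).toNat by omega]
        apply List.map_congr_left
        intro k _
        linear_combination hpn
      · rw [if_neg (by omega), abs_of_pos hlt, max_eq_left (le_of_lt hlt),
            show (n - (x - y)).toNat = (min (n + (x - y)) ((n.toNat : Int)) - (x - y)).toNat by omega]
        apply List.map_congr_left
        intro k _
        linear_combination hpn
    have e2 : (List.range (n - |y + x - (n - 1)|).toNat).map
          (fun (k : Nat) => (if x + y ≤ n - 1 then pos - (n - 1) * x
              else pos - (n - 1) * (x - |y + x - (n - 1)|)) + (k : Int) * (n - 1))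
        = (List.range (min (x + y + 1) ((n.toNat : Int)) - max (x + y - n + 1) 0).toNat).map
          (fun (k : Nat) => (max (x + y - n + 1) 0 + (k : Int)) * (n - 1) + (x + y)) := by
      rcases le_or_gt (x + y) (n - 1) with hle | hlt
      · rw [if_pos hle, abs_of_nonpos (by omega), max_eq_right (by omega),
            show (n - -(y + x - (n - 1))).toNat = (min (x + y + 1) ((n.toNat : Int)) - 0).toNat by omega]
        apply List.map_congr_left
        intro k _
        linear_combination hpn
      · rw [if_neg (by omega), abs_of_pos (by omega), max_eq_left (by omega),
            show (n - (y + x - (n - 1))).toNat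
              = (min (x + y + 1) ((n.toNat : Int)) - (x + y - n + 1)).toNat by omega]
        apply List.map_congr_left
        intro k _
        linear_combination hpn
    rw [e1, e2]
    rfl
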